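-- pv_equiv track=rewrite | github.com/Tiago-Risky/d6t8l06-logger | script.py | checkBoundary
-- ===== SOURCE A (Python) =====
-- camBoundariesX = ((0,1),(2,3),(4,5),(6,7),(8,9),(10,11),(12,13),(14,15))
--
-- camBoundariesY = (0,1)
--
-- def checkBoundary(argX, argY):
--         inside = False
--         box = -1
--
--         for x in range(len(camBoundariesX)):
--                 if camBoundariesX[x][0]<=argX<=camBoundariesX[x][1] and camBoundariesY[0]<=argY<=camBoundariesY[1]:
--                         inside = True
--                         box = x
--
--         return (inside, box)
-- ===== SOURCE B (Python) =====
-- camBoundariesX = ((0,1),(2,3),(4,5),(6,7),(8,9),(10,11),(12,13),(14,15))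
--
-- camBoundariesY = (0,1)
--
-- def checkBoundary(argX, argY):
--     # The 8 boxes tile [0,15] in steps of 2, so the box index is argX // 2.
--     if 0 <= argX <= 15 and camBoundariesY[0] <= argY <= camBoundariesY[1]:
--         return (True, argX // 2)
--     return (False, -1)
-- ===== Notes on version B (the rewrite author's own statement) =====
-- stated objective: simpler
-- what changed: Replaced the scan over all 8 boxes with an O(1) closed-form index computation (argX // 2) after a single bounds guard, relying on the boxes tiling [0,15] in steps of 2.
import Mathlib
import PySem

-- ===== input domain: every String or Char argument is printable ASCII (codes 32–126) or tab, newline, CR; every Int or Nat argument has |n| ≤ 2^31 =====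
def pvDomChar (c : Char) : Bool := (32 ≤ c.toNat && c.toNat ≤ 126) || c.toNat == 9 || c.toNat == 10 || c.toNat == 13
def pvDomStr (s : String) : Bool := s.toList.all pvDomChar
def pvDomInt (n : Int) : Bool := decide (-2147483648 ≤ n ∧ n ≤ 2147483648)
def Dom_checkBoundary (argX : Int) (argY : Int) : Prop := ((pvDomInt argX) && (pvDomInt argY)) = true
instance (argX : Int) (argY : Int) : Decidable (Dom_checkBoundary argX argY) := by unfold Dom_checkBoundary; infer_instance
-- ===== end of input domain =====

-- B replaces A's scan over the 8 boxes by a single bounds guard plus the closed-form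
-- box index argX // 2 (the boxes tile [0,15] in steps of 2): simpler, O(1).

-- ===== PORT A =====
def camBoundariesX : List (Int × Int) := [(0,1),(2,3),(4,5),(6,7),(8,9),(10,11),(12,13),(14,15)]

def camBoundariesY : Int × Int := (0,1)

def checkBoundary (argX : Int) (argY : Int) : Bool × Int :=
  (PySem.List.pyRange 0 (camBoundariesX.length) 1).foldl
    (fun (st : Bool × Int) (x : Int) =>
      match PySem.List.pyGet? camBoundariesX x with
      | some p =>
        if p.1 ≤ argX ∧ argX ≤ p.2 ∧ camBoundariesY.1 ≤ argY ∧ argY ≤ camBoundariesY.2 then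
          (true, x)
        else st
      | none => st)
    (false, -1)

-- ===== PORT B =====
def checkBoundary_alt (argX : Int) (argY : Int) : Bool × Int :=
  if 0 ≤ argX ∧ argX ≤ 15 ∧ camBoundariesY.1 ≤ argY ∧ argY ≤ camBoundariesY.2 then
    (true, PySem.Int.floordiv argX 2)
  else (false, -1)

-- ===== PRECONDITION & SPEC =====
def Spec_checkBoundary (argX : Int) (argY : Int) (out : Bool × Int) : Prop := out = checkBoundary_alt argX argY
instance (argX : Int) (argY : Int) (out : Bool × Int) : Decidable (Spec_checkBoundary argX argY out) := by unfold Spec_checkBoundary; infer_instance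

-- ===== CLAIM (what is proved, stated in full; the proofs are below) =====
def Claim_equal_checkBoundary : Prop := ∀ (argX : Int) (argY : Int), Dom_checkBoundary argX argY → Spec_checkBoundary argX argY (checkBoundary argX argY)

-- ===== LEMMAS AND PROOFS =====

-- ===== VERDICT (by name: the statement is the Claim_ definition above) =====
theorem checkBoundary_spec : Claim_equal_checkBoundary := by
  intro argX argY _
  unfold Spec_checkBoundary checkBoundary checkBoundary_alt
  rw [show PySem.List.pyRange 0 (camBoundariesX.length) 1 = [0,1,2,3,4,5,6,7] from by decide]
  simp only [List.foldl_cons, List.foldl_nil]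
  norm_num [PySem.List.pyGet?, PySem.List.pyIdx?, PySem.Int.floordiv, camBoundariesX, camBoundariesY]
  split_ifs <;> simp_all [Int.fdiv_eq_ediv] <;> omega
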